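-- pv_equiv track=rewrite | github.com/MichaelBoyo/data_structures_and_algorithm_python | permu.py | check
-- ===== SOURCE A (Python) =====
-- def check(n, m, games):
--     played = set()
--     for round in games:
--         team1 = set(round[:n // 2])
--         team2 = set(round[n // 2:])
--         for player1 in team1:
--             for player2 in team2:
--                 played.add((player1, player2))
--                 played.add((player2, player1))
--     for i in range(1, n + 1):
--         for j in range(i + 1, n + 1):
--             if (i, j) not in played:
--                 return False
--     return True
-- ===== SOURCE B (Python) =====
-- def check(n, m, games):
--     half = n // 2
--     return all(
--         any((i in r[:half] and j in r[half:]) or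
--             (j in r[:half] and i in r[half:]) for r in games)
--         for i in range(1, n + 1) for j in range(i + 1, n + 1)
--     )
-- ===== Notes on version B (the rewrite author's own statement) =====
-- stated objective: alternative
-- what changed: B drops A's played-set entirely: instead of building a symmetric hash set of all cross-half pairs and then querying it, B is pair-driven - for each required pair (i,j) it scans the rounds directly for one where i and j sit on opposite halves, as a short-circuiting all/any expression.
import Mathlib
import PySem

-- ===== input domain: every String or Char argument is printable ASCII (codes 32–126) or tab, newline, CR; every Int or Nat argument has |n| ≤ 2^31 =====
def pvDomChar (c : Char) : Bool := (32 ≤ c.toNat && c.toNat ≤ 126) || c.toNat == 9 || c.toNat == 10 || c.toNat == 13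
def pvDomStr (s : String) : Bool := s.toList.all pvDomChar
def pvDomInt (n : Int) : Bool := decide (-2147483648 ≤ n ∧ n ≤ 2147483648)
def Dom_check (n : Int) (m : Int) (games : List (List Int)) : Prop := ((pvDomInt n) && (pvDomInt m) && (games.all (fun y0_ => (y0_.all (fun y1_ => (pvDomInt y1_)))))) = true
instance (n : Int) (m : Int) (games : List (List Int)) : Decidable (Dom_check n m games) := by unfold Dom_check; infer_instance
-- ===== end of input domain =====

-- B is pair-driven: instead of A's symmetric played-set built in one pass and queried afterwards,
-- B checks each required pair (i,j) directly by scanning the rounds for one where i and j sit on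
-- opposite halves (an all/any expression, no auxiliary set) — alternative decomposition.

-- ===== PORT A =====
def check (n : Int) (m : Int) (games : List (List Int)) : Bool :=
  let played : PySem.Set (Int × Int) :=
    games.foldl (fun played rnd =>
      let team1 : PySem.Set Int := PySem.Set.ofList (PySem.List.slice rnd none (some (PySem.Int.floordiv n 2)))
      let team2 : PySem.Set Int := PySem.Set.ofList (PySem.List.slice rnd (some (PySem.Int.floordiv n 2)) none)
      team1.foldl (fun pl p1 =>
        team2.foldl (fun pl p2 =>
          PySem.Set.add (PySem.Set.add pl (p1, p2)) (p2, p1)) pl) played)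
      PySem.Set.empty
  (PySem.List.pyRange 1 (n + 1) 1).all (fun i =>
    (PySem.List.pyRange (i + 1) (n + 1) 1).all (fun j =>
      PySem.Set.contains played (i, j)))

-- ===== PORT B =====
def check_alt (n : Int) (m : Int) (games : List (List Int)) : Bool :=
  let half := PySem.Int.floordiv n 2
  (PySem.List.pyRange 1 (n + 1) 1).all (fun i =>
    (PySem.List.pyRange (i + 1) (n + 1) 1).all (fun j =>
      games.any (fun r =>
        ((PySem.List.slice r none (some half)).contains i && (PySem.List.slice r (some half) none).contains j) ||
        ((PySem.List.slice r none (some half)).contains j && (PySem.List.slice r (some half) none).contains i))))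

-- ===== PRECONDITION & SPEC =====
def Spec_check (n : Int) (m : Int) (games : List (List Int)) (out : Bool) : Prop := out = check_alt n m games
instance (n : Int) (m : Int) (games : List (List Int)) (out : Bool) : Decidable (Spec_check n m games out) := by unfold Spec_check; infer_instance

-- ===== CLAIM (what is proved, stated in full; the proofs are below) =====
def Claim_equal_check : Prop := ∀ (n : Int) (m : Int) (games : List (List Int)), Dom_check n m games → Spec_check n m games (check n m games)

-- ===== LEMMAS AND PROOFS =====

-- membership in a fold whose step, on every state, adds exactly the elements described by P
theorem mem_foldl_of_step {β α : Type} (l : List β) (s0 : List α) (f : List α → β → List α)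
    (P : β → α → Prop) (h : ∀ s b x, x ∈ f s b ↔ x ∈ s ∨ P b x) (x : α) :
    x ∈ l.foldl f s0 ↔ x ∈ s0 ∨ ∃ b ∈ l, P b x := by
  induction l generalizing s0 with
  | nil => simp
  | cons b l ih => simp [List.foldl_cons, ih, h]; tauto

-- "x sits in team1 and y in team2 of some round"
def CrossP (n : Int) (games : List (List Int)) (x y : Int) : Prop :=
  ∃ rnd ∈ games, x ∈ PySem.List.slice rnd none (some (PySem.Int.floordiv n 2)) ∧
                 y ∈ PySem.List.slice rnd (some (PySem.Int.floordiv n 2)) none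

theorem mem_playedA (n : Int) (games : List (List Int)) (p : Int × Int) :
    p ∈ (games.foldl (fun played rnd =>
      let team1 : PySem.Set Int := PySem.Set.ofList (PySem.List.slice rnd none (some (PySem.Int.floordiv n 2)))
      let team2 : PySem.Set Int := PySem.Set.ofList (PySem.List.slice rnd (some (PySem.Int.floordiv n 2)) none)
      team1.foldl (fun pl p1 =>
        team2.foldl (fun pl p2 =>
          PySem.Set.add (PySem.Set.add pl (p1, p2)) (p2, p1)) pl) played)
      (PySem.Set.empty : PySem.Set (Int × Int)))
    ↔ CrossP n games p.1 p.2 ∨ CrossP n games p.2 p.1 := by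
  rw [mem_foldl_of_step games _ _
    (fun rnd x => ∃ p1 ∈ PySem.List.slice rnd none (some (PySem.Int.floordiv n 2)),
      ∃ p2 ∈ PySem.List.slice rnd (some (PySem.Int.floordiv n 2)) none,
      x = (p1, p2) ∨ x = (p2, p1))]
  · constructor
    · rintro (h | ⟨rnd, hr, p1, h1, p2, h2, rfl | rfl⟩)
      · simp [PySem.Set.empty] at h
      · exact Or.inl ⟨rnd, hr, h1, h2⟩
      · exact Or.inr ⟨rnd, hr, h1, h2⟩
    · rintro (⟨rnd, hr, h1, h2⟩ | ⟨rnd, hr, h1, h2⟩)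
      · exact Or.inr ⟨rnd, hr, p.1, h1, p.2, h2, Or.inl rfl⟩
      · exact Or.inr ⟨rnd, hr, p.2, h1, p.1, h2, Or.inr rfl⟩
  · intro s rnd x
    rw [mem_foldl_of_step _ _ _
      (fun p1 x => ∃ p2 ∈ PySem.List.slice rnd (some (PySem.Int.floordiv n 2)) none,
        x = (p1, p2) ∨ x = (p2, p1))]
    · simp [PySem.Set.mem_ofList]
    · intro s p1 x
      rw [mem_foldl_of_step _ _ _ (fun p2 x => x = (p1, p2) ∨ x = (p2, p1))]
      · simp [PySem.Set.mem_ofList]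
      · intro s p2 x
        simp [PySem.Set.mem_add]
        tauto

theorem check_iff (n m : Int) (games : List (List Int)) :
    check n m games = true ↔
      ∀ x y : Int, (1 ≤ x ∧ x < y ∧ y ≤ n) →
        (CrossP n games x y ∨ CrossP n games y x) := by
  unfold check
  simp only [List.all_eq_true, PySem.List.mem_pyRange_one, PySem.Set.contains_iff]
  constructor
  · intro h x y ⟨h1, h2, h3⟩
    have := h x ⟨by omega, by omega⟩ y ⟨by omega, by omega⟩
    rwa [mem_playedA n games (x, y)] at this
  · intro h i ⟨hi1, hi2⟩ j ⟨hj1, hj2⟩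
    rw [mem_playedA n games (i, j)]
    exact h i j ⟨by omega, by omega, by omega⟩

theorem check_alt_iff (n m : Int) (games : List (List Int)) :
    check_alt n m games = true ↔
      ∀ x y : Int, (1 ≤ x ∧ x < y ∧ y ≤ n) →
        (CrossP n games x y ∨ CrossP n games y x) := by
  unfold check_alt CrossP
  simp only [List.all_eq_true, List.any_eq_true, PySem.List.mem_pyRange_one,
    Bool.or_eq_true, Bool.and_eq_true, List.contains_eq_mem, decide_eq_true_eq]
  constructor
  · intro h x y ⟨h1, h2, h3⟩
    obtain ⟨r, hr, hc⟩ := h x ⟨by omega, by omega⟩ y ⟨by omega, by omega⟩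
    rcases hc with ⟨ha, hb⟩ | ⟨ha, hb⟩
    · exact Or.inl ⟨r, hr, ha, hb⟩
    · exact Or.inr ⟨r, hr, ha, hb⟩
  · intro h i ⟨hi1, hi2⟩ j ⟨hj1, hj2⟩
    rcases h i j ⟨by omega, by omega, by omega⟩ with ⟨r, hr, ha, hb⟩ | ⟨r, hr, ha, hb⟩
    · exact ⟨r, hr, Or.inl ⟨ha, hb⟩⟩
    · exact ⟨r, hr, Or.inr ⟨ha, hb⟩⟩

-- ===== VERDICT (by name: the statement is the Claim_ definition above) =====
theorem check_spec : Claim_equal_check := by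
  intro n m games _
  unfold Spec_check
  rw [Bool.eq_iff_iff, check_iff, check_alt_iff]
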